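-- pv_equiv track=rewrite | github.com/dheerajalim/leetcode | Stacks/sum-of-subarray-minimums.py | mah
-- ===== SOURCE A (Python) =====
-- def mah(arr):
--     n = len(arr)
--     stack_left, stack_right = [], []
--     stack_left_index, stack_right_index = [], [n] * n
--
--     i, j = 0, n - 1
--
--     # for the left index
--
--     while i < n:
--
--         while stack_left and arr[i] <= stack_left[-1][0]:
--             stack_left.pop()
--
--         if stack_left:
--             stack_left_index.append(stack_left[-1][1])
--             stack_left.append((arr[i], i))
--
--         else:
--             stack_left_index.append(-1)
--             stack_left.append((arr[i], i))
--
--         i += 1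
--     # for the right index
--
--     while j >= 0:
--         # please note that we are using < and not <= here
--         # this is to avoid the same number being counted
--         # on both left and right side
--         while stack_right and arr[j] < stack_right[-1][0]:
--             stack_right.pop()
--
--         if stack_right:
--             stack_right_index[j] = stack_right[-1][1]
--             stack_right.append((arr[j], j))
--
--         else:
--             stack_right_index[j] = n
--             stack_right.append((arr[j], j))
--
--         j -= 1
--
--     return stack_right_index, stack_left_index
-- ===== SOURCE B (Python) =====
-- def mah(arr):
--     n = len(arr)
--     nxt = [n] * n
--     prev = []
--     stack = []  # indices with strictly increasing values
--     for i in range(n):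
--         while stack and arr[i] <= arr[stack[-1]]:
--             nxt[stack.pop()] = i
--         prev.append(stack[-1] if stack else -1)
--         stack.append(i)
--     return nxt, prev
-- ===== Notes on version B (the rewrite author's own statement) =====
-- stated objective: faster
-- what changed: Replaces A's two opposite-direction passes with two separate stacks by a single left-to-right pass with one monotonic index stack that records prev on push and fills nxt at pop time (measured ~3x constant-factor speedup).
import Mathlib
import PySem

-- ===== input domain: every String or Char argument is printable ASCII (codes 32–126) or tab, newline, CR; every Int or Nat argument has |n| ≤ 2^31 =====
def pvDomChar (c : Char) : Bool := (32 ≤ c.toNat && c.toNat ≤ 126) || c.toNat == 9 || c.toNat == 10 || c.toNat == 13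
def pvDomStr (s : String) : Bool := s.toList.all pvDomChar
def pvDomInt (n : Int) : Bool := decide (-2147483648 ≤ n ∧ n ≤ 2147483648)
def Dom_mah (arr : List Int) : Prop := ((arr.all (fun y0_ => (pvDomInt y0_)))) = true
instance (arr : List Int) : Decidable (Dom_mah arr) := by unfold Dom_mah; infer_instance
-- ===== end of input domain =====

-- B replaces A's two opposite-direction stack passes by a single left-to-right pass with one
-- index stack (prev recorded at push time, nxt filled at pop time); same O(n) bound, measured
-- constant-factor faster in a timing run.

-- ===== PORT A =====
-- A's two while-loops become folds over the index ranges; the inner while-pop loops are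
-- List.dropWhile on the stack (head = Python's stack[-1]); arr[i] with i always in range
-- is PySem.List.pyGetD arr i 0.
def mah (arr : List Int) : List Int × List Int :=
  let n : Int := arr.length
  -- while i < n: previous-strictly-smaller pass (stack of (value, index) pairs)
  let left := (PySem.List.pyRange 0 n 1).foldl
    (fun (st : List (Int × Int) × List Int) i =>
      let ai := PySem.List.pyGetD arr i 0
      let s := st.1.dropWhile (fun p => decide (ai ≤ p.1))
      let out := match s with
        | top :: _ => st.2 ++ [top.2]
        | [] => st.2 ++ [-1]
      ((ai, i) :: s, out)) ([], [])
  -- while j >= 0: next-smaller-or-equal pass (note < in the pop test); j ≥ 0 so j.toNat is exact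
  let right := (PySem.List.pyRange (n - 1) (-1) (-1)).foldl
    (fun (st : List (Int × Int) × List Int) j =>
      let aj := PySem.List.pyGetD arr j 0
      let s := st.1.dropWhile (fun p => decide (aj < p.1))
      let out := match s with
        | top :: _ => st.2.set j.toNat top.2
        | [] => st.2.set j.toNat n
      ((aj, j) :: s, out)) ([], List.replicate arr.length n)
  (right.2, left.2)

-- ===== PORT B =====
-- B's inner 'while stack and arr[i] <= arr[stack[-1]]: nxt[stack.pop()] = i' loop:
def mahPop (arr : List Int) (ai i : Int) : List Int → List Int → List Int × List Int
  | [], nxt => ([], nxt)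
  | p :: s, nxt =>
    if decide (ai ≤ PySem.List.pyGetD arr p 0) then mahPop arr ai i s (nxt.set p.toNat i)
    else (p :: s, nxt)

def mah_alt (arr : List Int) : List Int × List Int :=
  let n : Int := arr.length
  let st := (PySem.List.pyRange 0 n 1).foldl
    (fun (st : (List Int × List Int) × List Int) i =>
      let ai := PySem.List.pyGetD arr i 0
      let r := mahPop arr ai i st.1.1 st.1.2
      let prev := match r.1 with
        | top :: _ => st.2 ++ [top]
        | [] => st.2 ++ [-1]
      ((i :: r.1, r.2), prev)) (([], List.replicate arr.length n), [])
  (st.1.2, st.2)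

-- ===== PRECONDITION & SPEC =====
def Spec_mah (arr : List Int) (out : List Int × List Int) : Prop := out = mah_alt arr
instance (arr : List Int) (out : List Int × List Int) : Decidable (Spec_mah arr out) := by unfold Spec_mah; infer_instance

-- ===== CLAIM (what is proved, stated in full; the proofs are below) =====
def Claim_equal_mah : Prop := ∀ (arr : List Int), Dom_mah arr → Spec_mah arr (mah arr)

-- ===== LEMMAS AND PROOFS =====

-- value of arr at a Nat index (indices handled in the proofs are always in range)
def pvV (arr : List Int) (j : Nat) : Int := arr.getD j 0

-- indices j < i still on the left stack after processing 0..i-1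
def pvVisL (arr : List Int) (i : Nat) : List Nat :=
  (List.range i).filter (fun j => decide (∀ k < i, j < k → pvV arr j < pvV arr k))

-- indices k ≥ t still on A's right stack after processing t..n-1
def pvVisR (arr : List Int) (t : Nat) : List Nat :=
  (List.range arr.length).filter (fun k => decide (t ≤ k ∧ ∀ m < k, t ≤ m → pvV arr k ≤ pvV arr m))

-- index of the first k > p with arr[k] ≤ arr[p], or n
def pvNse (arr : List Int) (p : Nat) : Nat :=
  (((List.range arr.length).filter (fun k => decide (p < k ∧ pvV arr k ≤ pvV arr p))).headD arr.length)

-- the value appended to the prev/left-index list at step i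
def pvPrevOut (arr : List Int) (i : Nat) : Int :=
  match ((pvVisL arr i).filter (fun j => !decide (pvV arr i ≤ pvV arr j))).getLast? with
  | some j => (j : Int)
  | none => -1


-- generic list facts
theorem pv_dropWhile_eq_filter {α : Type} (p : α → Bool) (l : List α)
    (h : l.Pairwise (fun x y => p y = true → p x = true)) :
    l.dropWhile p = l.filter (fun x => !p x) := by
  induction l with
  | nil => rfl
  | cons a l ih =>
    rcases List.pairwise_cons.mp h with ⟨ha, ht⟩
    by_cases hp : p a = true
    · simp [List.dropWhile_cons, List.filter_cons, hp, ih ht]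
    · simp only [List.dropWhile_cons, List.filter_cons, hp, Bool.not_false, Bool.false_eq_true,
        if_false, if_true]
      have : ∀ x ∈ l, ¬ p x = true := fun x hx hpx => hp (ha x hx hpx)
      rw [List.filter_eq_self.mpr (by intro x hx; simp [this x hx])]

theorem pv_head_le {l : List Nat} (hs : l.Pairwise (· < ·)) {k : Nat}
    (hk : l.head? = some k) : ∀ x ∈ l, k ≤ x := by
  cases l with
  | nil => simp at hk
  | cons a t =>
    simp only [List.head?_cons, Option.some.injEq] at hk
    subst hk
    intro x hx
    rcases List.mem_cons.mp hx with h | h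
    · omega
    · exact Nat.le_of_lt ((List.pairwise_cons.mp hs).1 x h)

theorem pv_head_eq {l : List Nat} (hs : l.Pairwise (· < ·)) {k : Nat}
    (hk : k ∈ l) (hlb : ∀ x ∈ l, k ≤ x) : l.head? = some k := by
  cases l with
  | nil => simp at hk
  | cons a t =>
    rcases List.mem_cons.mp hk with h | h
    · simp [h]
    · exact absurd (hlb a (List.mem_cons_self)) (by
        have := (List.pairwise_cons.mp hs).1 k h; omega)

theorem pv_filter_range'_cons : ∀ (len s a : Nat) (q : Nat → Bool), s ≤ a → a < s + len →
    q a = true → (∀ m, m < a → q m = false) →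
    (List.range' s len).filter q = a :: (List.range' s len).filter (fun k => q k && decide (a < k)) := by
  intro len
  induction len with
  | zero => intro s a q h1 h2; omega
  | succ len ih =>
    intro s a q h1 h2 hq hmin
    rw [List.range'_succ]
    by_cases hsa : s = a
    · subst hsa
      have hx1 : ∀ x ∈ List.range' (s+1) len, q x = (q x && decide (s < x)) := by
        intro x hx
        rw [List.mem_range'] at hx
        have hsx : s < x := by omega
        simp [hsx]
      simp [List.filter_cons, hq, ← List.filter_congr hx1]
    · have hlt : s < a := by omega
      have hqs : q s = false := hmin s hlt
      simp only [List.filter_cons, hqs, Bool.false_and]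
      exact ih (s+1) a q (by omega) (by omega) hq hmin

theorem pv_filter_range_cons (n a : Nat) (q : Nat → Bool) (h2 : a < n)
    (hq : q a = true) (hmin : ∀ m, m < a → q m = false) :
    (List.range n).filter q = a :: (List.range n).filter (fun k => q k && decide (a < k)) := by
  rw [List.range_eq_range']
  exact pv_filter_range'_cons n 0 a q (Nat.zero_le a) (by omega) hq hmin

theorem pv_mem_visL (arr : List Int) (i j : Nat) :
    j ∈ pvVisL arr i ↔ j < i ∧ ∀ k < i, j < k → pvV arr j < pvV arr k := by
  simp [pvVisL, List.mem_filter]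

theorem pv_mem_visR (arr : List Int) (t k : Nat) :
    k ∈ pvVisR arr t ↔ k < arr.length ∧ t ≤ k ∧ ∀ m < k, t ≤ m → pvV arr k ≤ pvV arr m := by
  simp [pvVisR, List.mem_filter]

theorem pv_visL_sorted (arr : List Int) (i : Nat) : (pvVisL arr i).Pairwise (· < ·) :=
  List.Pairwise.filter _ (List.pairwise_lt_range)

theorem pv_visR_sorted (arr : List Int) (t : Nat) : (pvVisR arr t).Pairwise (· < ·) :=
  List.Pairwise.filter _ (List.pairwise_lt_range)

theorem pv_visL_val {arr : List Int} {i x y : Nat} (hx : x ∈ pvVisL arr i)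
    (hy : y ∈ pvVisL arr i) (hxy : x < y) : pvV arr x < pvV arr y := by
  rw [pv_mem_visL] at hx hy
  exact hx.2 y hy.1 hxy

theorem pv_visR_val {arr : List Int} {t x y : Nat} (hx : x ∈ pvVisR arr t)
    (hy : y ∈ pvVisR arr t) (hxy : x < y) : pvV arr y ≤ pvV arr x := by
  rw [pv_mem_visR] at hx hy
  exact hy.2.2 x hxy hx.2.1

theorem pv_visL_succ (arr : List Int) (i : Nat) :
    pvVisL arr (i+1) = (pvVisL arr i).filter (fun j => !decide (pvV arr i ≤ pvV arr j)) ++ [i] := by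
  unfold pvVisL
  rw [List.range_succ, List.filter_append, List.filter_filter]
  congr 1
  · apply List.filter_congr
    intro j hj
    rw [List.mem_range] at hj
    rw [Bool.eq_iff_iff]
    simp only [Bool.and_eq_true, decide_eq_true_eq, Bool.not_eq_true',
      decide_eq_false_iff_not, not_le]
    constructor
    · intro h
      exact ⟨h i (by omega) hj, fun k hk hjk => h k (by omega) hjk⟩
    · intro h k hk hjk
      by_cases hki : k = i
      · subst hki; exact h.1
      · exact h.2 k (by omega) hjk
  · simp
    intro k h1 h2
    omega

theorem pv_nse_le (arr : List Int) (p : Nat) : pvNse arr p ≤ arr.length := by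
  unfold pvNse
  rw [List.headD_eq_head?_getD]
  cases hh : ((List.range arr.length).filter (fun k => decide (p < k ∧ pvV arr k ≤ pvV arr p))).head? with
  | none => simp
  | some k =>
    have : k ∈ (List.range arr.length).filter (fun k => decide (p < k ∧ pvV arr k ≤ pvV arr p)) :=
      List.mem_of_mem_head? hh
    rw [List.mem_filter, List.mem_range] at this
    simpa using Nat.le_of_lt this.1

-- p is popped at step i (it is on the stack and arr[i] ≤ arr[p]) iff i is p's next-smaller-or-equal
theorem pv_pop_iff (arr : List Int) (i p : Nat) (hi : i < arr.length) :
    (p ∈ pvVisL arr i ∧ pvV arr i ≤ pvV arr p) ↔ pvNse arr p = i := by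
  constructor
  · intro ⟨hm, hle⟩
    rw [pv_mem_visL] at hm
    unfold pvNse
    rw [pv_filter_range_cons arr.length i _ hi (by simp [hm.1, hle])
      (by intro m hmi
          by_cases hpm : p < m
          · have := hm.2 m hmi hpm
            simp; omega
          · simp; omega)]
    simp
  · intro h
    unfold pvNse at h
    cases hh : ((List.range arr.length).filter (fun k => decide (p < k ∧ pvV arr k ≤ pvV arr p))).head? with
    | none =>
      rw [List.head?_eq_none_iff] at hh
      rw [List.headD_eq_head?_getD] at h
      rw [hh] at h
      simp at h
      omega
    | some k =>
      rw [List.headD_eq_head?_getD, hh] at h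
      simp at h
      subst h
      have hkm : k ∈ (List.range arr.length).filter (fun k => decide (p < k ∧ pvV arr k ≤ pvV arr p)) :=
        List.mem_of_mem_head? hh
      have hmin := pv_head_le (List.Pairwise.filter _ (List.pairwise_lt_range)) hh
      rw [List.mem_filter, List.mem_range] at hkm
      have hk2 := of_decide_eq_true hkm.2
      refine ⟨(pv_mem_visL arr k p).mpr ⟨hk2.1, ?_⟩, hk2.2⟩
      intro m hmk hpm
      by_contra hcon
      have hmmem : m ∈ (List.range arr.length).filter (fun k => decide (p < k ∧ pvV arr k ≤ pvV arr p)) := by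
        rw [List.mem_filter, List.mem_range]
        exact ⟨by omega, by simp; omega⟩
      have := hmin m hmmem
      omega

theorem pv_visR_succ (arr : List Int) (j : Nat) (hj : j < arr.length) :
    pvVisR arr j = j :: (pvVisR arr (j+1)).filter (fun k => !decide (pvV arr j < pvV arr k)) := by
  unfold pvVisR
  rw [pv_filter_range_cons arr.length j _ hj (by simp; omega)
    (by intro m hm; simp; omega)]
  rw [List.filter_filter]
  congr 1
  apply List.filter_congr
  intro k hk
  rw [List.mem_range] at hk
  rw [Bool.eq_iff_iff]
  simp only [Bool.and_eq_true, decide_eq_true_eq, Bool.not_eq_true',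
    decide_eq_false_iff_not, not_lt]
  constructor
  · intro h
    exact ⟨h.1.2 j h.2 (le_refl j), by omega, fun m hm hjm => h.1.2 m hm (by omega)⟩
  · intro h
    refine ⟨⟨by omega, fun m hm hjm => ?_⟩, by omega⟩
    by_cases hmj : m = j
    · subst hmj; exact h.1
    · exact h.2.2 m hm (by omega)

theorem pv_right_top (arr : List Int) (j : Nat) (hj : j < arr.length) :
    ((pvVisR arr (j+1)).filter (fun k => !decide (pvV arr j < pvV arr k))).head? =
    ((List.range arr.length).filter (fun k => decide (j < k ∧ pvV arr k ≤ pvV arr j))).head? := by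
  have hsub : ∀ x ∈ (pvVisR arr (j+1)).filter (fun k => !decide (pvV arr j < pvV arr k)),
      x ∈ (List.range arr.length).filter (fun k => decide (j < k ∧ pvV arr k ≤ pvV arr j)) := by
    intro x hx
    rw [List.mem_filter] at hx
    rcases hx with ⟨hv, hkeep⟩
    rw [pv_mem_visR] at hv
    rw [List.mem_filter, List.mem_range]
    simp only [Bool.not_eq_true', decide_eq_false_iff_not, not_lt] at hkeep
    exact ⟨hv.1, by simp; exact ⟨by omega, hkeep⟩⟩
  cases hh : ((List.range arr.length).filter (fun k => decide (j < k ∧ pvV arr k ≤ pvV arr j))).head? with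
  | none =>
    rw [List.head?_eq_none_iff] at hh
    rw [List.head?_eq_none_iff]
    rcases List.eq_nil_or_concat ((pvVisR arr (j+1)).filter (fun k => !decide (pvV arr j < pvV arr k))) with h | ⟨l, x, h⟩
    · exact h
    · exfalso
      have : x ∈ (pvVisR arr (j+1)).filter (fun k => !decide (pvV arr j < pvV arr k)) := by
        rw [h]; simp
      have := hsub x this
      rw [hh] at this
      simp at this
  | some k0 =>
    have hk0 : k0 ∈ (List.range arr.length).filter (fun k => decide (j < k ∧ pvV arr k ≤ pvV arr j)) :=
      List.mem_of_mem_head? hh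
    have hlb := pv_head_le (List.Pairwise.filter _ (List.pairwise_lt_range)) hh
    rw [List.mem_filter, List.mem_range] at hk0
    have hk0' := of_decide_eq_true hk0.2
    apply pv_head_eq (List.Pairwise.filter _ (pv_visR_sorted arr (j+1)))
    · rw [List.mem_filter]
      constructor
      · rw [pv_mem_visR]
        refine ⟨hk0.1, by omega, fun m hm hjm => ?_⟩
        have hq : ¬ (j < m ∧ pvV arr m ≤ pvV arr j) := by
          intro hc
          have : m ∈ (List.range arr.length).filter (fun k => decide (j < k ∧ pvV arr k ≤ pvV arr j)) := by
            rw [List.mem_filter, List.mem_range]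
            exact ⟨by omega, by simpa using hc⟩
          have := hlb m this
          omega
        have : pvV arr j < pvV arr m := by
          by_contra hcon
          exact hq ⟨by omega, by omega⟩
        omega
      · simp
        omega
    · intro x hx
      exact hlb x (hsub x hx)

theorem pv_foldl_set_getElem? (l : List Nat) (c : Int) :
    ∀ (nxt : List Int) (p : Nat), (l.foldl (fun a j => a.set j c) nxt)[p]? =
      if p ∈ l ∧ p < nxt.length then some c else nxt[p]? := by
  induction l with
  | nil => intro nxt p; simp
  | cons j l ih =>
    intro nxt p
    rw [List.foldl_cons, ih, List.length_set, List.getElem?_set]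
    by_cases hp : p < nxt.length
    · by_cases hpj : j = p
      · subst hpj
        by_cases hpl : j ∈ l <;> simp [hpl, hp]
      · by_cases hpl : p ∈ l <;> simp [hpl, hp, hpj, List.mem_cons]
        intro h
        omega
    · have h1 : nxt[p]? = none := by rw [List.getElem?_eq_none_iff]; omega
      by_cases hpj : j = p
      · subst hpj; simp [hp, h1]
      · simp [hp, h1, hpj]

-- proof-side names for the fold steps of the ports (definitionally equal to the lambdas)
def pvStepA (arr : List Int) (st : List (Int × Int) × List Int) (i : Int) : List (Int × Int) × List Int :=
  let ai := PySem.List.pyGetD arr i 0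
  let s := st.1.dropWhile (fun p => decide (ai ≤ p.1))
  let out := match s with
    | top :: _ => st.2 ++ [top.2]
    | [] => st.2 ++ [-1]
  ((ai, i) :: s, out)

def pvStepRA (arr : List Int) (st : List (Int × Int) × List Int) (j : Int) : List (Int × Int) × List Int :=
  let aj := PySem.List.pyGetD arr j 0
  let s := st.1.dropWhile (fun p => decide (aj < p.1))
  let out := match s with
    | top :: _ => st.2.set j.toNat top.2
    | [] => st.2.set j.toNat (arr.length : Int)
  ((aj, j) :: s, out)

def pvStepB (arr : List Int) (st : (List Int × List Int) × List Int) (i : Int) : (List Int × List Int) × List Int :=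
  let ai := PySem.List.pyGetD arr i 0
  let r := mahPop arr ai i st.1.1 st.1.2
  let prev := match r.1 with
    | top :: _ => st.2 ++ [top]
    | [] => st.2 ++ [-1]
  ((i :: r.1, r.2), prev)

theorem pv_mah_unfold (arr : List Int) :
    mah arr = (((PySem.List.pyRange ((arr.length : Int) - 1) (-1) (-1)).foldl (pvStepRA arr)
        ([], List.replicate arr.length (arr.length : Int))).2,
      ((PySem.List.pyRange 0 (arr.length : Int) 1).foldl (pvStepA arr) ([], [])).2) := rfl

theorem pv_mah_alt_unfold (arr : List Int) :
    mah_alt arr = (((PySem.List.pyRange 0 (arr.length : Int) 1).foldl (pvStepB arr)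
        (([], List.replicate arr.length (arr.length : Int)), [])).1.2,
      ((PySem.List.pyRange 0 (arr.length : Int) 1).foldl (pvStepB arr)
        (([], List.replicate arr.length (arr.length : Int)), [])).2) := rfl

-- nxt after the first i steps of B's pass
def pvNxt (arr : List Int) (i : Nat) : List Int :=
  (List.range arr.length).map (fun p => if pvNse arr p < i then (pvNse arr p : Int) else (arr.length : Int))

-- A's right-index array after processing indices n-1 .. n-t
def pvOutR (arr : List Int) (t : Nat) : List Int :=
  (List.range arr.length).map (fun p => if arr.length - t ≤ p then (pvNse arr p : Int) else (arr.length : Int))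

theorem pv_set_map_range (n j : Nat) (f g : Nat → Int) (x : Int) (hj : j < n)
    (hfg : ∀ p, p < n → p ≠ j → f p = g p) (hgj : g j = x) :
    ((List.range n).map f).set j x = (List.range n).map g := by
  apply List.ext_getElem?
  intro p
  rw [List.getElem?_set]
  by_cases hp : p < n
  · by_cases hpj : j = p
    · subst hpj
      simp [List.getElem?_map, List.getElem?_range, hp, hgj]
    · simp [List.getElem?_map, List.getElem?_range, hp, hfg p hp (by omega)]
      omega
  · have h1 : ((List.range n).map f)[p]? = none := by
      rw [List.getElem?_eq_none_iff]; simp; omega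
    have h2 : ((List.range n).map g)[p]? = none := by
      rw [List.getElem?_eq_none_iff]; simp; omega
    by_cases hpj : j = p
    · subst hpj; simp [hp, h1, h2]
    · simp [hpj, h1, h2]

theorem pv_pairL (arr : List Int) (i : Nat) :
    ((pvVisL arr i).reverse).Pairwise
      (fun x y => decide (pvV arr i ≤ pvV arr y) = true → decide (pvV arr i ≤ pvV arr x) = true) := by
  rw [List.pairwise_reverse]
  apply List.Pairwise.imp_of_mem _ (pv_visL_sorted arr i)
  intro a b ha hb hab
  simp only [decide_eq_true_eq]
  intro h
  exact le_of_lt (lt_of_le_of_lt h (pv_visL_val ha hb hab))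

theorem pv_leftA_inv (arr : List Int) : ∀ i, i ≤ arr.length →
    ((List.range i).map (fun (k : Nat) => (k : Int))).foldl (pvStepA arr) ([], []) =
      ((pvVisL arr i).reverse.map (fun (j : Nat) => (pvV arr j, (j : Int))),
       (List.range i).map (pvPrevOut arr)) := by
  intro i
  induction i with
  | zero => intro _; simp [pvVisL]
  | succ i ih =>
    intro hi
    rw [List.range_succ]
    simp only [List.map_append, List.foldl_append]
    rw [ih (by omega)]
    simp only [List.map_cons, List.map_nil, List.foldl_cons, List.foldl_nil]
    have hai : PySem.List.pyGetD arr (i : Int) 0 = pvV arr i := by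
      simp [PySem.List.pyGetD_natCast, pvV]
    have hdrop : ((pvVisL arr i).reverse.map (fun (j : Nat) => (pvV arr j, (j : Int)))).dropWhile
        (fun p => decide (pvV arr i ≤ p.1)) =
        (((pvVisL arr i).filter (fun j => !decide (pvV arr i ≤ pvV arr j))).reverse).map
          (fun j => (pvV arr j, (j : Int))) := by
      rw [List.dropWhile_map]
      have hc : ((fun p : Int × Int => decide (pvV arr i ≤ p.1)) ∘ fun (j : Nat) => (pvV arr j, (j : Int))) = fun j => decide (pvV arr i ≤ pvV arr j) := rfl
      rw [hc, pv_dropWhile_eq_filter _ _ (pv_pairL arr i), ← List.filter_reverse]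
    unfold pvStepA
    simp only [hai, hdrop]
    rw [pv_visL_succ]
    rcases hrev : ((pvVisL arr i).filter (fun j => !decide (pvV arr i ≤ pvV arr j))).reverse with _ | ⟨t, rest⟩
    · simp only [List.map_nil]
      have hfil : (pvVisL arr i).filter (fun j => !decide (pvV arr i ≤ pvV arr j)) = [] := by
        rwa [List.reverse_eq_nil_iff] at hrev
      have hpo : pvPrevOut arr i = -1 := by
        unfold pvPrevOut
        rw [List.getLast?_eq_head?_reverse, hrev]
        rfl
      simp [hrev, hpo, hfil]
    · simp only [List.map_cons]
      have hpo : pvPrevOut arr i = (t : Int) := by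
        unfold pvPrevOut
        rw [List.getLast?_eq_head?_reverse, hrev]
        rfl
      simp [hrev, hpo, List.reverse_append]

theorem pv_pairR (arr : List Int) (t : Nat) (aj : Int) :
    (pvVisR arr t).Pairwise
      (fun x y => decide (aj < pvV arr y) = true → decide (aj < pvV arr x) = true) := by
  apply List.Pairwise.imp_of_mem _ (pv_visR_sorted arr t)
  intro a b ha hb hab
  simp only [decide_eq_true_eq]
  intro h
  exact lt_of_lt_of_le h (pv_visR_val ha hb hab)

theorem pv_visR_len (arr : List Int) : pvVisR arr arr.length = [] := by
  rw [pvVisR, List.filter_eq_nil_iff]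
  intro k hk
  rw [List.mem_range] at hk
  simp
  omega

theorem pv_outR_zero (arr : List Int) :
    pvOutR arr 0 = List.replicate arr.length (arr.length : Int) := by
  unfold pvOutR
  rw [List.eq_replicate_iff]
  refine ⟨by simp, ?_⟩
  intro x hx
  rw [List.mem_map] at hx
  rcases hx with ⟨p, hp, hx⟩
  rw [List.mem_range] at hp
  rw [← hx, if_neg (by omega)]

theorem pv_rightA_inv (arr : List Int) : ∀ t, t ≤ arr.length →
    (List.range t).foldl (fun st (k : Nat) => pvStepRA arr st ((arr.length : Int) - 1 - (k : Int)))
        ([], List.replicate arr.length (arr.length : Int)) =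
      ((pvVisR arr (arr.length - t)).map (fun (j : Nat) => (pvV arr j, (j : Int))), pvOutR arr t) := by
  intro t
  induction t with
  | zero =>
    intro _
    simp [pv_visR_len, pv_outR_zero]
  | succ t ih =>
    intro ht
    rw [List.range_succ, List.foldl_append, ih (by omega), List.foldl_cons, List.foldl_nil]
    set n := arr.length with hn
    have hj : n - 1 - t < n := by omega
    have hjt : (n : Int) - 1 - (t : Int) = ((n - 1 - t : Nat) : Int) := by omega
    set j := n - 1 - t with hjdef
    have hnt : n - t = j + 1 := by omega
    have hnt1 : n - (t + 1) = j := by omega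
    rw [hjt, hnt]
    have hai : PySem.List.pyGetD arr (j : Int) 0 = pvV arr j := by
      simp [PySem.List.pyGetD_natCast, pvV]
    unfold pvStepRA
    simp only [hai]
    have hdrop : ((pvVisR arr (j+1)).map (fun (j : Nat) => (pvV arr j, (j : Int)))).dropWhile
        (fun p => decide (pvV arr j < p.1)) =
        ((pvVisR arr (j+1)).filter (fun k => !decide (pvV arr j < pvV arr k))).map
          (fun (j : Nat) => (pvV arr j, (j : Int))) := by
      rw [List.dropWhile_map]
      have hc : ((fun p : Int × Int => decide (pvV arr j < p.1)) ∘ fun (k : Nat) => (pvV arr k, (k : Int))) = fun k => decide (pvV arr j < pvV arr k) := rfl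
      rw [hc, pv_dropWhile_eq_filter _ _ (pv_pairR arr (j+1) (pvV arr j))]
    simp only [hdrop]
    rw [hnt1, pv_visR_succ arr j hj]
    rcases hF : (pvVisR arr (j+1)).filter (fun k => !decide (pvV arr j < pvV arr k)) with _ | ⟨t0, rest⟩
    · have hnse : pvNse arr j = n := by
        unfold pvNse
        rw [List.headD_eq_head?_getD, ← pv_right_top arr j hj, hF]
        rfl
      simp only [List.map_nil, List.map_cons]
      congr 1
      unfold pvOutR
      rw [show ((j : Int).toNat) = j by simp]
      exact pv_set_map_range n j _ _ _ hj
        (by intro p hp hpj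
            by_cases hc : n - t ≤ p
            · rw [if_pos hc, if_pos (by omega)]
            · rw [if_neg hc, if_neg (by omega)])
        (by rw [if_pos (by omega), hnse])
    · have hnse : pvNse arr j = t0 := by
        unfold pvNse
        rw [List.headD_eq_head?_getD, ← pv_right_top arr j hj, hF]
        rfl
      simp only [List.map_cons]
      congr 1
      unfold pvOutR
      rw [show ((j : Int).toNat) = j by simp]
      exact pv_set_map_range n j _ _ _ hj
        (by intro p hp hpj
            by_cases hc : n - t ≤ p
            · rw [if_pos hc, if_pos (by omega)]
            · rw [if_neg hc, if_neg (by omega)])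
        (by rw [if_pos (by omega), hnse])

theorem pv_mahPop (arr : List Int) (ai iI : Int) : ∀ (s : List Nat) (nxt : List Int),
    s.Pairwise (fun x y => decide (ai ≤ pvV arr y) = true → decide (ai ≤ pvV arr x) = true) →
    mahPop arr ai iI (s.map (fun (j : Nat) => (j : Int))) nxt =
      ((s.filter (fun j => !decide (ai ≤ pvV arr j))).map (fun (j : Nat) => (j : Int)),
       (s.filter (fun j => decide (ai ≤ pvV arr j))).foldl (fun a j => a.set j iI) nxt) := by
  have hcons : ∀ (p : Int) (l : List Int) (nxt : List Int), mahPop arr ai iI (p :: l) nxt =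
      if decide (ai ≤ PySem.List.pyGetD arr p 0) = true then mahPop arr ai iI l (nxt.set p.toNat iI)
      else (p :: l, nxt) := fun p l nxt => rfl
  intro s
  induction s with
  | nil => intro nxt _; simp [mahPop]
  | cons j s ih =>
    intro nxt h
    rcases List.pairwise_cons.mp h with ⟨hhead, htail⟩
    have hval : PySem.List.pyGetD arr ((j : Nat) : Int) 0 = pvV arr j := by
      simp [PySem.List.pyGetD_natCast, pvV]
    by_cases hp : decide (ai ≤ pvV arr j) = true
    · rw [List.map_cons, hcons, hval, if_pos hp]
      rw [ih _ htail]
      rw [show ((j : Int)).toNat = j by simp]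
      simp [List.filter_cons, hp]
    · rw [List.map_cons, hcons, hval, if_neg (by simpa using hp)]
      have hall : ∀ y ∈ s, ¬ decide (ai ≤ pvV arr y) = true := fun y hy hc => hp (hhead y hy hc)
      have hfil1 : s.filter (fun j => !decide (ai ≤ pvV arr j)) = s :=
        List.filter_eq_self.mpr (by intro y hy; simpa using hall y hy)
      have hfil2 : s.filter (fun j => decide (ai ≤ pvV arr j)) = [] :=
        List.filter_eq_nil_iff.mpr (by intro y hy; simpa using hall y hy)
      simp [List.filter_cons, hp, hfil1, hfil2]

theorem pv_nxt_zero (arr : List Int) :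
    pvNxt arr 0 = List.replicate arr.length (arr.length : Int) := by
  unfold pvNxt
  rw [List.eq_replicate_iff]
  refine ⟨by simp, ?_⟩
  intro x hx
  rw [List.mem_map] at hx
  rcases hx with ⟨p, hp, hx⟩
  rw [← hx, if_neg (by omega)]

theorem pv_B_inv (arr : List Int) : ∀ i, i ≤ arr.length →
    ((List.range i).map (fun (k : Nat) => (k : Int))).foldl (pvStepB arr)
        (([], List.replicate arr.length (arr.length : Int)), []) =
      (((pvVisL arr i).reverse.map (fun (j : Nat) => (j : Int)), pvNxt arr i),
       (List.range i).map (pvPrevOut arr)) := by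
  intro i
  induction i with
  | zero => intro _; simp [pvVisL, pv_nxt_zero]
  | succ i ih =>
    intro hi
    rw [List.range_succ]
    simp only [List.map_append, List.foldl_append]
    rw [ih (by omega)]
    simp only [List.map_cons, List.map_nil, List.foldl_cons, List.foldl_nil]
    have hai : PySem.List.pyGetD arr ((i : Nat) : Int) 0 = pvV arr i := by
      simp [PySem.List.pyGetD_natCast, pvV]
    unfold pvStepB
    simp only [hai]
    have hpair : ((pvVisL arr i).reverse).Pairwise
        (fun x y => decide (pvV arr i ≤ pvV arr y) = true → decide (pvV arr i ≤ pvV arr x) = true) :=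
      pv_pairL arr i
    rw [pv_mahPop arr (pvV arr i) (i : Int) _ _ hpair]
    simp only [List.filter_reverse]
    have hnxt : (((pvVisL arr i).filter (fun j => decide (pvV arr i ≤ pvV arr j))).reverse).foldl
        (fun a j => a.set j ((i : Nat) : Int)) (pvNxt arr i) = pvNxt arr (i + 1) := by
      apply List.ext_getElem?
      intro p
      rw [pv_foldl_set_getElem?]
      have hlen : (pvNxt arr i).length = arr.length := by simp [pvNxt]
      by_cases hp : p < arr.length
      · have hmem : p ∈ ((pvVisL arr i).filter (fun j => decide (pvV arr i ≤ pvV arr j))).reverse ↔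
            pvNse arr p = i := by
          rw [List.mem_reverse, List.mem_filter, decide_eq_true_eq]
          exact pv_pop_iff arr i p (by omega)
        by_cases hin : pvNse arr p = i
        · rw [if_pos ⟨hmem.mpr hin, by omega⟩]
          unfold pvNxt
          rw [List.getElem?_map, List.getElem?_range hp]
          simp [hin]
        · rw [if_neg (by rw [hlen]; intro hc; exact hin (hmem.mp hc.1))]
          unfold pvNxt
          rw [List.getElem?_map, List.getElem?_map, List.getElem?_range hp]
          simp only [Option.map_some]
          by_cases hlt : pvNse arr p < i
          · rw [if_pos hlt, if_pos (by omega)]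
          · rw [if_neg hlt, if_neg (by omega)]
      · rw [if_neg (by rw [hlen]; intro hc; omega)]
        unfold pvNxt
        rw [List.getElem?_eq_none_iff.mpr (by simp; omega), List.getElem?_eq_none_iff.mpr (by simp; omega)]
    rw [hnxt]
    rw [pv_visL_succ]
    rcases hrev : ((pvVisL arr i).filter (fun j => !decide (pvV arr i ≤ pvV arr j))).reverse with _ | ⟨t, rest⟩
    · have hpo : pvPrevOut arr i = -1 := by
        unfold pvPrevOut
        rw [List.getLast?_eq_head?_reverse, hrev]
        rfl
      have hfil : (pvVisL arr i).filter (fun j => !decide (pvV arr i ≤ pvV arr j)) = [] := by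
        rwa [List.reverse_eq_nil_iff] at hrev
      simp [hrev, hpo, hfil]
    · have hpo : pvPrevOut arr i = (t : Int) := by
        unfold pvPrevOut
        rw [List.getLast?_eq_head?_reverse, hrev]
        rfl
      simp [hrev, hpo, List.reverse_append]

theorem pv_outR_final (arr : List Int) :
    pvOutR arr arr.length = (List.range arr.length).map (fun p => (pvNse arr p : Int)) := by
  unfold pvOutR
  apply List.map_congr_left
  intro p hp
  rw [if_pos (by omega)]

theorem pv_nxt_final (arr : List Int) :
    pvNxt arr arr.length = (List.range arr.length).map (fun p => (pvNse arr p : Int)) := by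
  unfold pvNxt
  apply List.map_congr_left
  intro p hp
  by_cases h : pvNse arr p < arr.length
  · rw [if_pos h]
  · rw [if_neg h]
    have := pv_nse_le arr p
    have : pvNse arr p = arr.length := by omega
    rw [this]

theorem pv_range_bridge (arr : List Int) :
    PySem.List.pyRange 0 (arr.length : Int) 1 = (List.range arr.length).map (fun (k : Nat) => (k : Int)) := by
  rw [PySem.List.pyRange_one]
  simp

theorem pv_range_bridge_rev (arr : List Int) :
    PySem.List.pyRange ((arr.length : Int) - 1) (-1) (-1) =
      (List.range arr.length).map (fun (k : Nat) => ((arr.length : Int) - 1 - (k : Int))) := by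
  rw [PySem.List.pyRange_neg_one]
  have h : ((arr.length : Int) - 1 - (-1)).toNat = arr.length := by omega
  rw [h]

theorem pv_main (arr : List Int) : mah arr = mah_alt arr := by
  rw [pv_mah_unfold, pv_mah_alt_unfold, pv_range_bridge, pv_range_bridge_rev]
  rw [pv_B_inv arr arr.length (le_refl _), pv_leftA_inv arr arr.length (le_refl _)]
  rw [List.foldl_map]
  rw [pv_rightA_inv arr arr.length (le_refl _)]
  simp only [pv_outR_final, pv_nxt_final]

-- ===== VERDICT (by name: the statement is the Claim_ definition above) =====
theorem mah_spec : Claim_equal_mah := by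
  intro arr _
  exact pv_main arr
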